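-- pv_equiv track=rewrite | github.com/ims-student-projects/pythia-nlu | models/hmm_slot_filler.py | get_trigrams
-- ===== SOURCE A (Python) =====
-- def get_trigrams(sequence):
--     """
--     Params:
--         sequence: list of strings
--     Returns list of tripels (tuples of 3 elements)
--     """
--     trigrams = []
--     s_1 = '<START>'
--     s_2 = '<START>'
--     for s in sequence:
--         trigrams.append( (s_2, s_1, s) )
--         s_2 = s_1
--         s_1 = s
--     trigrams.append( (s_2, s_1, '<STOP>') )
--     return trigrams
-- ===== SOURCE B (Python) =====
-- def get_trigrams(sequence):
--     padded = ['<START>', '<START>', *sequence, '<STOP>']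
--     return list(zip(padded, padded[1:], padded[2:]))
-- ===== Notes on version B (the rewrite author's own statement) =====
-- stated objective: idiomatic
-- what changed: Builds the padded list up front and slides three offset views over it with zip, removing the running s_1/s_2 state variables.
import Mathlib
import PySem

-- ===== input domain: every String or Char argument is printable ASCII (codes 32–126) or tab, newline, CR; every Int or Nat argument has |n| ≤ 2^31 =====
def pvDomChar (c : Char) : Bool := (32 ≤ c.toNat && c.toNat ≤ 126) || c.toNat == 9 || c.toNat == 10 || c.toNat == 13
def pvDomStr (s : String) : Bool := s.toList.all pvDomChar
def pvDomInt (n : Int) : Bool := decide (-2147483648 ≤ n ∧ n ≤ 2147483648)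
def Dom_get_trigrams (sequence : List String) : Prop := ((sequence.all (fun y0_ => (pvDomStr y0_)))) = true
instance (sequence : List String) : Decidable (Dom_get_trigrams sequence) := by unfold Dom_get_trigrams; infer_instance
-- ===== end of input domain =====

-- B builds the padded list up front and zips three offset views over it, instead of
-- A's loop with running s_1/s_2 state; same cost, more idiomatic.

-- ===== PORT A =====
-- state = (trigrams, s_1, s_2), exactly A's three variables
def get_trigrams (sequence : List String) : List (String × String × String) :=
  let st := sequence.foldl
    (fun st s => (st.1 ++ [(st.2.2, st.2.1, s)], s, st.2.1))
    (([] : List (String × String × String)), "<START>", "<START>")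
  st.1 ++ [(st.2.2, st.2.1, "<STOP>")]

-- ===== PORT B =====
def get_trigrams_alt (sequence : List String) : List (String × String × String) :=
  let padded := "<START>" :: "<START>" :: (sequence ++ ["<STOP>"])
  padded.zip ((PySem.List.slice padded (some 1) none).zip (PySem.List.slice padded (some 2) none))

-- ===== PRECONDITION & SPEC =====
def Spec_get_trigrams (sequence : List String) (out : List (String × String × String)) : Prop := out = get_trigrams_alt sequence
instance (sequence : List String) (out : List (String × String × String)) : Decidable (Spec_get_trigrams sequence out) := by unfold Spec_get_trigrams; infer_instance

-- ===== CLAIM (what is proved, stated in full; the proofs are below) =====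
def Claim_equal_get_trigrams : Prop := ∀ (sequence : List String), Dom_get_trigrams sequence → Spec_get_trigrams sequence (get_trigrams sequence)

-- ===== LEMMAS AND PROOFS =====

-- reference trigram list, recursion on the sequence
def trig : String → String → List String → List (String × String × String)
  | s2, s1, [] => [(s2, s1, "<STOP>")]
  | s2, s1, s :: rest => (s2, s1, s) :: trig s1 s rest

lemma foldlA_eq_trig (seq : List String) :
    ∀ (acc : List (String × String × String)) (s1 s2 : String),
    (let st := seq.foldl (fun st s => (st.1 ++ [(st.2.2, st.2.1, s)], s, st.2.1)) (acc, s1, s2)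
     st.1 ++ [(st.2.2, st.2.1, "<STOP>")]) = acc ++ trig s2 s1 seq := by
  induction seq with
  | nil => intro acc s1 s2; simp [trig]
  | cons s rest ih =>
    intro acc s1 s2
    simp only [List.foldl_cons]
    have := ih (acc ++ [(s2, s1, s)]) s s1
    simpa [trig, List.append_assoc] using this

lemma zip_eq_trig (seq : List String) :
    ∀ (s1 s2 : String),
    (s2 :: s1 :: (seq ++ ["<STOP>"])).zip
      ((s1 :: (seq ++ ["<STOP>"])).zip (seq ++ ["<STOP>"])) = trig s2 s1 seq := by
  induction seq with
  | nil => intro s1 s2; simp [trig]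
  | cons s rest ih =>
    intro s1 s2
    simp only [List.cons_append, List.zip_cons_cons, trig]
    exact congrArg _ (ih s s1)

-- ===== VERDICT (by name: the statement is the Claim_ definition above) =====
theorem get_trigrams_spec : Claim_equal_get_trigrams := by
  intro seq _
  unfold Spec_get_trigrams get_trigrams get_trigrams_alt
  dsimp only
  rw [PySem.List.slice_from_one]
  have h2 : PySem.List.slice ("<START>" :: "<START>" :: (seq ++ ["<STOP>"])) (some 2) none
      = seq ++ ["<STOP>"] := by
    rw [show (2 : Int) = ((2 : Nat) : Int) from rfl, PySem.List.slice_from_natCast]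
    rfl
  simpa [h2] using (foldlA_eq_trig seq [] "<START>" "<START>").trans
    (zip_eq_trig seq "<START>" "<START>").symm
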